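-- pv_equiv track=rewrite | github.com/sina-programer/Snake_Game_Tk-old | Snake Game Tk.py | get_next_position
-- ===== SOURCE A (Python) =====
-- def get_next_position(snake_history_of_move, position):
--     is_found = False
--     for p in snake_history_of_move:
--         if is_found:
--             return p
--         if position == p:
--             is_found = True
--     return snake_history_of_move[-1]
-- ===== SOURCE B (Python) =====
-- def get_next_position(snake_history_of_move, position):
--     # Stage 1: build the successor map of the path (first occurrence wins).
--     successor = {}
--     for prev, nxt in zip(snake_history_of_move, snake_history_of_move[1:]):
--         successor.setdefault(prev, nxt)
--     # Stage 2: one dictionary lookup; fall back to the last position.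
--     return successor.get(position, snake_history_of_move[-1])
-- ===== Notes on version B (the rewrite author's own statement) =====
-- stated objective: alternative
-- what changed: Replaces A's flag-tracking linear scan with a two-stage algorithm: first build a successor dictionary from adjacent pairs (zip, setdefault keeps the first occurrence), then answer by a single dict lookup with the last element as fallback.
import Mathlib
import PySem

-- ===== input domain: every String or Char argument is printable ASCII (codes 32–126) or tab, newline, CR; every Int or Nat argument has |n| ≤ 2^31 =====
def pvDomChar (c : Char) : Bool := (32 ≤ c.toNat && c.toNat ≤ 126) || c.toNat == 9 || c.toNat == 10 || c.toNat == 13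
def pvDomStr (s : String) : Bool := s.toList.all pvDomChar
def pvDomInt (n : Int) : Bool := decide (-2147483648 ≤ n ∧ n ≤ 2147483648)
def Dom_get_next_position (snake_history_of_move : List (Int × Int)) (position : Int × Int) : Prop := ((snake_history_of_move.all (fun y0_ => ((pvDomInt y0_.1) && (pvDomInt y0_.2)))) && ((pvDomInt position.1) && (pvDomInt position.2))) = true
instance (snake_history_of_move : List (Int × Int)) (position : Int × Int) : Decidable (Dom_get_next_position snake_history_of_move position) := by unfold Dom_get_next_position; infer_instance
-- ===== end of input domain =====

-- B replaces A's flag-tracking scan with a two-stage algorithm: build a successor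
-- dictionary from adjacent pairs (first occurrence wins), then one lookup with the
-- last element as fallback. Alternative decomposition, same O(n) cost.

-- ===== PORT A =====
-- the for-loop with its is_found flag; returns none when the loop falls through
def gnpLoop (position : Int × Int) : List (Int × Int) → Bool → Option (Int × Int)
  | [], _ => none
  | p :: rest, is_found =>
      if is_found then some p
      else gnpLoop position rest (is_found || decide (position = p))

def get_next_position (snake_history_of_move : List (Int × Int)) (position : Int × Int) : Int × Int :=
  match gnpLoop position snake_history_of_move false with
  | some p => p
  | none => (PySem.List.pyGet? snake_history_of_move (-1)).getD (0, 0)  -- [-1]; Pre_ rules out the empty-list IndexError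

-- ===== PORT B =====
def get_next_position_alt (snake_history_of_move : List (Int × Int)) (position : Int × Int) : Int × Int :=
  -- successor = {}; for prev, nxt in zip(xs, xs[1:]): successor.setdefault(prev, nxt)
  let successor : PySem.Dict (Int × Int) (Int × Int) :=
    (List.zip snake_history_of_move (PySem.List.slice snake_history_of_move (some 1) none)).foldl
      (fun d pr => d.setdefault pr.1 pr.2) PySem.Dict.empty
  -- return successor.get(position, xs[-1]); Pre_ rules out the empty-list IndexError
  successor.getD position ((PySem.List.pyGet? snake_history_of_move (-1)).getD (0, 0))

-- ===== PRECONDITION & SPEC =====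
-- A (and B) raise IndexError on the empty list (snake_history_of_move[-1]); excluded.
def Pre_get_next_position (snake_history_of_move : List (Int × Int)) (position : Int × Int) : Prop :=
  snake_history_of_move ≠ []
instance (snake_history_of_move : List (Int × Int)) (position : Int × Int) : Decidable (Pre_get_next_position snake_history_of_move position) := by unfold Pre_get_next_position; infer_instance

def pvWitness_get_next_position : (List (Int × Int)) × (Int × Int) := ([(0, 0), (1, 1)], (0, 0))

def Spec_get_next_position (snake_history_of_move : List (Int × Int)) (position : Int × Int) (out : Int × Int) : Prop := out = get_next_position_alt snake_history_of_move position
instance (snake_history_of_move : List (Int × Int)) (position : Int × Int) (out : Int × Int) : Decidable (Spec_get_next_position snake_history_of_move position out) := by unfold Spec_get_next_position; infer_instance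

-- ===== CLAIM (what is proved, stated in full; the proofs are below) =====
def Claim_equal_get_next_position : Prop := ∀ (snake_history_of_move : List (Int × Int)) (position : Int × Int), Dom_get_next_position snake_history_of_move position → Pre_get_next_position snake_history_of_move position → Spec_get_next_position snake_history_of_move position (get_next_position snake_history_of_move position)

-- ===== LEMMAS AND PROOFS =====

-- A's loop once the flag is set: it returns the next element immediately.
theorem gnpLoop_true (position : Int × Int) (xs : List (Int × Int)) :
    gnpLoop position xs true = xs.head? := by
  cases xs <;> simp [gnpLoop]

-- Characterisation of A's loop: the element after the first occurrence, if any.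
theorem gnpLoop_false (position : Int × Int) (xs : List (Int × Int)) :
    gnpLoop position xs false =
      (PySem.List.index? xs position).bind (fun i => xs[i + 1]?) := by
  induction xs with
  | nil => simp [gnpLoop]
  | cons p rest ih =>
    by_cases h : position = p
    · subst h
      rw [PySem.List.index?_cons_self]
      simp [gnpLoop, gnpLoop_true, List.head?_eq_getElem?]
    · rw [show gnpLoop position (p :: rest) false
            = gnpLoop position rest false by simp [gnpLoop, h], ih,
          PySem.List.index?_cons_of_ne rest (fun h' => h h'.symm)]
      cases PySem.List.index? rest position <;> simp

-- A setdefault loop looks up as: the seed dict first, else first match in the pair list.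
theorem foldl_setdefault_get? (pairs : List ((Int × Int) × (Int × Int)))
    (d : PySem.Dict (Int × Int) (Int × Int)) (k : Int × Int) :
    (pairs.foldl (fun d pr => d.setdefault pr.1 pr.2) d).get? k
      = (d.get? k).or ((PySem.Dict.mk pairs).get? k) := by
  induction pairs generalizing d with
  | nil => simp [PySem.Dict.get?]
  | cons ab rest ih =>
    obtain ⟨a, b⟩ := ab
    rw [List.foldl_cons, ih, PySem.Dict.get?_mk_cons]
    by_cases h : k = a
    · subst h
      rw [PySem.Dict.get?_setdefault_self]
      cases d.get? k <;> simp
    · rw [PySem.Dict.get?_setdefault_of_ne _ _ h]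
      simp [show (a == k) = false by simpa using fun h' => h h'.symm]

-- The dict of adjacent pairs, read as a first-match association list.
theorem zip_tail_get? (xs : List (Int × Int)) (k : Int × Int) :
    (PySem.Dict.mk (xs.zip xs.tail)).get? k
      = (PySem.List.index? xs k).bind (fun i => xs[i + 1]?) := by
  induction xs with
  | nil => simp [PySem.Dict.get?]
  | cons p rest ih =>
    by_cases h : p = k
    · subst h
      rw [PySem.List.index?_cons_self]
      cases rest with
      | nil => simp [PySem.Dict.get?]
      | cons q rest' => simp [PySem.Dict.get?_mk_cons]
    · have hk : (PySem.List.index? (p :: rest) k)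
          = (PySem.List.index? rest k).map (· + 1) :=
        PySem.List.index?_cons_of_ne rest h
      cases rest with
      | nil =>
        rw [hk]
        simp [PySem.Dict.get?, PySem.List.index?]
      | cons q rest' =>
        rw [show (p :: q :: rest').zip (p :: q :: rest').tail
              = (p, q) :: (q :: rest').zip (q :: rest').tail by simp,
            PySem.Dict.get?_mk_cons, hk, ih]
        simp only [show (p == k) = false by simpa using h]
        cases PySem.List.index? (q :: rest') k <;> simp

-- ===== VERDICT =====
theorem get_next_position_spec : Claim_equal_get_next_position := by
  intro xs position _ hpre
  unfold Spec_get_next_position get_next_position get_next_position_alt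
  rw [gnpLoop_false]
  simp only [PySem.List.slice_from_one, PySem.Dict.getD_eq_get?_getD,
    foldl_setdefault_get?, PySem.Dict.get?_empty, Option.none_or, zip_tail_get?]
  cases (PySem.List.index? xs position).bind (fun i => xs[i + 1]?) <;> simp
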